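-- pv_equiv track=rewrite | github.com/FarahR01/tunisia_water_stress | src/train.py | choose_target
-- ===== SOURCE A (Python) =====
-- def choose_target(columns):
--     # Prioritize "Level of water stress" as the primary target
--     cols_lower = [c.lower() for c in columns]
--     # First pass: look for exact "water stress" indicator
--     for i, c in enumerate(columns):
--         if "water stress" in cols_lower[i]:
--             return c
--     # Second pass: any freshwater/withdraw indicator (fallback)
--     for i, c in enumerate(columns):
--         name = cols_lower[i]
--         if "freshwater" in name or "withdraw" in name:
--             return c
--     return None
-- ===== SOURCE B (Python) =====
-- def choose_target(columns):
--     # Single pass: return immediately on "water stress"; record first fallback.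
--     fallback = None
--     for c in columns:
--         name = c.lower()
--         if "water stress" in name:
--             return c
--         if fallback is None and ("freshwater" in name or "withdraw" in name):
--             fallback = c
--     return fallback
-- ===== Notes on version B (the rewrite author's own statement) =====
-- stated objective: simpler
-- what changed: Replaced A's two sequential scans (plus a precomputed lowercase list) with one pass that returns on a 'water stress' match and records the first 'freshwater'/'withdraw' column as a fallback.
import Mathlib
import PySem

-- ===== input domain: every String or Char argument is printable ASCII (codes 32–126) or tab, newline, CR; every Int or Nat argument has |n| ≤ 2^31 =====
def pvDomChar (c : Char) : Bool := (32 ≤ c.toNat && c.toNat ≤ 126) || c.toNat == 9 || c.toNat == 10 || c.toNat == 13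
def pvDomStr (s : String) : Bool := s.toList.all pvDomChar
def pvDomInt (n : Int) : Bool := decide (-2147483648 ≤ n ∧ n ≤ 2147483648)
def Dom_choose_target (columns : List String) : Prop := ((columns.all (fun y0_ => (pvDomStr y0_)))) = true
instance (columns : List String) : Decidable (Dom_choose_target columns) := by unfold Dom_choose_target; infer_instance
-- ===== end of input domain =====

-- B replaces A's two sequential scans with one pass that records the first fallback; same return value.


-- ===== PORT A =====
-- two sequential scans over (column, lowercase) pairs, as in Source A (cols_lower precomputed)
def ctPass1 : List (String × String) → Option String
  | [] => none
  | (c, name) :: rest =>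
      if PySem.Str.isIn "water stress" name then some c else ctPass1 rest

def ctPass2 : List (String × String) → Option String
  | [] => none
  | (c, name) :: rest =>
      if PySem.Str.isIn "freshwater" name || PySem.Str.isIn "withdraw" name then some c
      else ctPass2 rest

def choose_target (columns : List String) : Option String :=
  let cols_lower := columns.map PySem.Str.lower
  let pairs := columns.zip cols_lower
  match ctPass1 pairs with
  | some c => some c
  | none => ctPass2 pairs

-- ===== PORT B =====
-- single pass with a fallback accumulator, as in Source B
def ctGo : List String → Option String → Option String
  | [], fallback => fallback
  | c :: rest, fallback =>
      let name := PySem.Str.lower c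
      if PySem.Str.isIn "water stress" name then some c
      else if fallback.isNone && (PySem.Str.isIn "freshwater" name || PySem.Str.isIn "withdraw" name) then
        ctGo rest (some c)
      else ctGo rest fallback

def choose_target_alt (columns : List String) : Option String :=
  ctGo columns none

-- ===== PRECONDITION & SPEC =====
def Spec_choose_target (columns : List String) (out : Option String) : Prop := out = choose_target_alt columns
instance (columns : List String) (out : Option String) : Decidable (Spec_choose_target columns out) := by unfold Spec_choose_target; infer_instance

-- ===== CLAIM (what is proved, stated in full; the proofs are below) =====
def Claim_equal_choose_target : Prop := ∀ (columns : List String), Dom_choose_target columns → Spec_choose_target columns (choose_target columns)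

-- ===== LEMMAS AND PROOFS =====

theorem ctGo_eq (columns : List String) (fb : Option String) :
    ctGo columns fb =
      match ctPass1 (columns.zip (columns.map PySem.Str.lower)) with
      | some c => some c
      | none =>
        match fb with
        | some f => some f
        | none => ctPass2 (columns.zip (columns.map PySem.Str.lower)) := by
  induction columns generalizing fb with
  | nil => cases fb <;> rfl
  | cons c rest ih =>
    simp only [List.map_cons, List.zip_cons_cons, ctGo, ctPass1, ctPass2]
    by_cases h1 : PySem.Chars.isIn ['w', 'a', 't', 'e', 'r', ' ', 's', 't', 'r', 'e', 's', 's']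
        (PySem.Chars.lower c.toList) = true
    · simp [h1]
    · cases fb with
      | some f => simp [h1, ih]
      | none =>
        by_cases h2 : (PySem.Chars.isIn ['f', 'r', 'e', 's', 'h', 'w', 'a', 't', 'e', 'r']
              (PySem.Chars.lower c.toList) = true ∨
            PySem.Chars.isIn ['w', 'i', 't', 'h', 'd', 'r', 'a', 'w']
              (PySem.Chars.lower c.toList) = true)
        · simp [h1, h2, ih]
        · simp [h1, h2, ih]

-- ===== VERDICT (by name: the statement is the Claim_ definition above) =====
theorem choose_target_spec : Claim_equal_choose_target := by
  intro columns _
  unfold Spec_choose_target choose_target choose_target_alt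
  rw [ctGo_eq]
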